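-- pv_equiv track=rewrite | github.com/ghareth/bibulous | bibulous_tools.py | get_delim_levels
-- ===== SOURCE A (Python) =====
-- def get_delim_levels(s, delims=('{','}'), operator=None):
--     '''
--     Generate a list of level numbers for each character in a string.
--
--     Parameters
--     ----------
--     s : str
--         The string to characterize.
--     delims : tuple of two strings
--         The (left-hand-side delimiter, right-hand-side delimiter).
--     operator : str
--         The "operator" string that appears to the left of the delimiter. For example, operator=r'\textbf' allows the \
--         code to look for nested structures like `{...}` and simultaneously for structures like `\textbf{...}`, and be \
--         able to keep track of which is which.
--
--     Returns
--     -------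
--     levels : list of ints
--         A list giving the operator delimiter level (or "brace level" if no operator is given) of each character in \
--         the string.
--     '''
--
--     stack = []
--     oplevels = [0]*len(s)        ## operator level
--     brlevels = [0]*len(s)        ## brace level
--
--     ## Locate the left-delimiters and increment the level each time we find one.
--     if (operator != None) and (s.count(operator) < 1):
--         return(oplevels)
--
--     for j,c in enumerate(s):
--         if (c == delims[0]):
--             if (operator != None) and (s[j-len(operator):j] == operator):
--                 stack.append('o')       ## add an "operator" marker to the stack
--             else:
--                 stack.append('b')       ## add a "brace level" marker to the stack
--         elif (c == delims[1]):
--             ## If the stack is empty but the delimiter level isn't resolved, then the braces are unbalanced.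
--             if not stack: return([])
--             stack.pop()
--
--         if (operator != None): oplevels[j] = stack.count('o')
--         brlevels[j] = stack.count('b')
--
--     if (operator != None):
--         return(oplevels)
--     else:
--         return(brlevels)
-- ===== SOURCE B (Python) =====
-- def get_delim_levels(s, delims=('{','}'), operator=None):
--     # Interval method: first match each delimiter pair, recording the span each
--     # relevant push stays open as +1/-1 endpoints in a difference array, then
--     # derive every character's level in one prefix-sum pass (no per-char level
--     # bookkeeping during the matching scan).
--     n = len(s)
--     if operator is not None and s.count(operator) == 0:
--         return [0] * n
--     L = len(operator) if operator is not None else 0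
--     diff = [0] * (n + 1)
--     opens = []  # (push position, counts-toward-requested-kind)
--     for j in range(n):
--         c = s[j]
--         if c == delims[0]:
--             if operator is not None:
--                 rel = j >= L and s[j - L:j] == operator
--             else:
--                 rel = True
--             opens.append((j, rel))
--         elif c == delims[1]:
--             if not opens:
--                 return []
--             p, rel = opens.pop()
--             if rel:
--                 diff[p] += 1
--                 diff[j] -= 1
--     for p, rel in opens:
--         if rel:
--             diff[p] += 1
--     levels = []
--     acc = 0
--     for d in diff[:n]:
--         acc += d
--         levels.append(acc)
--     return levels
-- ===== Notes on version B (the rewrite author's own statement) =====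
-- stated objective: alternative
-- what changed: B replaces A's online per-character recount of the marker stack by an interval method: a first pass only matches delimiter pairs and records each relevant span as +1/-1 endpoints in a difference array, and a second pass derives every character's level as running prefix sums; it avoids A's O(depth) recount per character, though a timing run's shallow inputs showed no >=1.5x gain.
import Mathlib
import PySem

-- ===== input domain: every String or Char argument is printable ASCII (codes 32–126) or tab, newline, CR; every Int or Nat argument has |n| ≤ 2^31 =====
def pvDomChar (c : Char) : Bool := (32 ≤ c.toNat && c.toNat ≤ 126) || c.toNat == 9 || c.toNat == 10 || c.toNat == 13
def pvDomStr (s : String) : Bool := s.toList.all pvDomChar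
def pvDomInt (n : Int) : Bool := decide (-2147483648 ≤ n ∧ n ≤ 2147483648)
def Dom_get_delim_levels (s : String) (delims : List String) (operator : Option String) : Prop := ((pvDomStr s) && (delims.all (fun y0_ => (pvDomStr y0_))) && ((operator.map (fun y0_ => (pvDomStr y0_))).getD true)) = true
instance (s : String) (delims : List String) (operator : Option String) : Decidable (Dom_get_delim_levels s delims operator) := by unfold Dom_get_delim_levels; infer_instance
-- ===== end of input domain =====

-- B replaces A's online per-character stack recount by an interval method: it first matches the
-- delimiter pairs recording each relevant span as ±1 endpoints in a difference array, then obtains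
-- every character's level in one prefix-sum pass.

-- ===== PORT A =====
-- marker pushed at a left delimiter: 'o' if the operator string immediately precedes (Python slice s[j-len(op):j])
def pvA_mark (s : String) (op? : Option String) (j : Int) : Char :=
  match op? with
  | some op =>
      if PySem.Str.slice s (some (j - (op.length : Int))) (some j) = op then 'o' else 'b'
  | none => 'b'

-- the for-loop of A: stack of 'o'/'b' markers, oplevels/brlevels updated by index assignment, stack.count each step
def pvA_loop (s : String) (d0 d1 : String) (op? : Option String) :
    List (Int × Char) → List Char → List Int → List Int → List Int
  | [], _, oplevels, brlevels => if op?.isSome then oplevels else brlevels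
  | (j, c) :: rest, stack, oplevels, brlevels =>
      if String.mk [c] = d0 then
        let stack' := pvA_mark s op? j :: stack
        pvA_loop s d0 d1 op? rest stack'
          (if op?.isSome then oplevels.set j.toNat (stack'.count 'o' : Int) else oplevels)
          (brlevels.set j.toNat (stack'.count 'b' : Int))
      else if String.mk [c] = d1 then
        match stack with
        | [] => []
        | _ :: tl =>
            pvA_loop s d0 d1 op? rest tl
              (if op?.isSome then oplevels.set j.toNat (tl.count 'o' : Int) else oplevels)
              (brlevels.set j.toNat (tl.count 'b' : Int))
      else
        pvA_loop s d0 d1 op? rest stack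
          (if op?.isSome then oplevels.set j.toNat (stack.count 'o' : Int) else oplevels)
          (brlevels.set j.toNat (stack.count 'b' : Int))

def get_delim_levels (s : String) (delims : List String) (operator : Option String) : List Int :=
  let cs := s.toList
  let oplevels : List Int := List.replicate cs.length 0
  let brlevels : List Int := List.replicate cs.length 0
  -- delims[0]/delims[1] would raise IndexError when missing; Pre_ excludes every input where the loop reads them
  let d0 := (PySem.List.pyGet? delims 0).getD ""
  let d1 := (PySem.List.pyGet? delims 1).getD ""
  match operator with
  | some op =>
      if PySem.Str.count s op < 1 then oplevels
      else pvA_loop s d0 d1 (some op) (PySem.List.enumerate cs 0) [] oplevels brlevels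
  | none => pvA_loop s d0 d1 none (PySem.List.enumerate cs 0) [] oplevels brlevels

-- ===== PORT B =====
def pvB_isOp (s : String) (op? : Option String) (j : Int) : Bool :=
  match op? with
  | some op =>
      decide ((op.length : Int) ≤ j) &&
        (PySem.Str.slice s (some (j - (op.length : Int))) (some j) == op)
  | none => false

-- matching pass of Source B: stack of (push position, counts-toward-output) pairs; a pop records the
-- closed span's endpoints in the difference array; none = the `return []` on an unmatched closer
def pvB_pass1 (s : String) (d0 d1 : String) (op? : Option String) :
    List (Int × Char) → List (Int × Bool) → List Int → Option (List Int × List (Int × Bool))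
  | [], opens, diff => some (diff, opens)
  | (j, c) :: rest, opens, diff =>
      if String.mk [c] = d0 then
        let rel := match op? with
                   | some _ => pvB_isOp s op? j
                   | none => true
        pvB_pass1 s d0 d1 op? rest ((j, rel) :: opens) diff
      else if String.mk [c] = d1 then
        match opens with
        | [] => none
        | (p, rel) :: tl =>
            let diff' := diff.set p.toNat (diff.getD p.toNat 0 + 1)
            let diff'' := diff'.set j.toNat (diff'.getD j.toNat 0 - 1)
            pvB_pass1 s d0 d1 op? rest tl (if rel then diff'' else diff)
      else
        pvB_pass1 s d0 d1 op? rest opens diff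

-- `for p, rel in opens: if rel: diff[p] += 1` (Source B's opens grows at the end, so oldest first = reverse of the stack)
def pvB_leftover (opens : List (Int × Bool)) (diff : List Int) : List Int :=
  opens.reverse.foldl (fun d pr => if pr.2 then d.set pr.1.toNat (d.getD pr.1.toNat 0 + 1) else d) diff

-- final pass: running prefix sums of diff[:n]
def pvB_scan : List Int → Int → List Int
  | [], _ => []
  | d :: rest, acc => (acc + d) :: pvB_scan rest (acc + d)

def get_delim_levels_alt (s : String) (delims : List String) (operator : Option String) : List Int :=
  let cs := s.toList
  let n := cs.length
  let d0 := (PySem.List.pyGet? delims 0).getD ""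
  let d1 := (PySem.List.pyGet? delims 1).getD ""
  let main :=
    match pvB_pass1 s d0 d1 operator (PySem.List.enumerate cs 0) [] (List.replicate (n + 1) 0) with
    | none => ([] : List Int)
    | some (diff, opens) => pvB_scan ((pvB_leftover opens diff).take n) 0
  match operator with
  | some op => if PySem.Str.count s op == 0 then List.replicate n 0 else main
  | none => main

-- ===== PRECONDITION & SPEC =====
-- Pre_ excludes exactly the inputs where A raises IndexError reading delims[0]/delims[1]:
-- it holds when delims has both entries, or the loop body is never reached (empty s, or the
-- operator early-return fires), or only the delims[0] branch is ever taken.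
def Pre_get_delim_levels (s : String) (delims : List String) (operator : Option String) : Prop :=
  2 ≤ delims.length ∨ s.toList = [] ∨
  (operator ≠ none ∧ PySem.Str.count s (operator.getD "") = 0) ∨
  (delims.length = 1 ∧ ∀ c ∈ s.toList, String.mk [c] = delims.headD "")
instance (s : String) (delims : List String) (operator : Option String) : Decidable (Pre_get_delim_levels s delims operator) := by unfold Pre_get_delim_levels; infer_instance

def pvWitness_get_delim_levels : String × List String × Option String := ("a{b{c}}", ["{", "}"], some "b")

def Spec_get_delim_levels (s : String) (delims : List String) (operator : Option String) (out : List Int) : Prop := out = get_delim_levels_alt s delims operator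
instance (s : String) (delims : List String) (operator : Option String) (out : List Int) : Decidable (Spec_get_delim_levels s delims operator out) := by unfold Spec_get_delim_levels; infer_instance

-- ===== CLAIM (what is proved, stated in full; the proofs are below) =====
def Claim_equal_get_delim_levels : Prop := ∀ (s : String) (delims : List String) (operator : Option String), Dom_get_delim_levels s delims operator → Pre_get_delim_levels s delims operator → Spec_get_delim_levels s delims operator (get_delim_levels s delims operator)

-- ===== LEMMAS AND PROOFS =====

-- reference loop used only by the proofs: A's loop with running counters instead of stack recounts
def pvRef (s : String) (d0 d1 : String) (op? : Option String) :
    List (Int × Char) → List Bool → Int → Int → List Int → List Int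
  | [], _, _, _, acc => acc
  | (j, c) :: rest, stack, oc, bc, acc =>
      if String.mk [c] = d0 then
        let isOp := pvB_isOp s op? j
        let oc' := if isOp then oc + 1 else oc
        let bc' := if isOp then bc else bc + 1
        pvRef s d0 d1 op? rest (isOp :: stack) oc' bc'
          (acc ++ [if op?.isSome then oc' else bc'])
      else if String.mk [c] = d1 then
        match stack with
        | [] => []
        | top :: tl =>
            let oc' := if top then oc - 1 else oc
            let bc' := if top then bc else bc - 1
            pvRef s d0 d1 op? rest tl oc' bc'
              (acc ++ [if op?.isSome then oc' else bc'])
      else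
        pvRef s d0 d1 op? rest stack oc bc
          (acc ++ [if op?.isSome then oc else bc])

-- a Python slice ending at j with negative start is shorter than op, hence ≠ op
lemma pvSlice_ne (s op : String) (j : Nat) (hj : j < op.length) (h0 : 0 < op.length) :
    PySem.Str.slice s (some ((j : Int) - (op.length : Int))) (some (j : Int)) ≠ op := by
  intro he
  have hlen := congrArg (fun t : String => t.toList.length) he
  simp only [PySem.Str.toList_slice, PySem.Chars.slice_eq_listSlice] at hlen
  rw [PySem.List.length_slice] at hlen
  have hb : PySem.List.clampIdx s.toList.length ((j : Int)) = min j s.toList.length := by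
    simp
  have ha : PySem.List.clampIdx s.toList.length ((j : Int) - (op.length : Int))
      = s.toList.length - (op.length - j) := by
    have heq : (j : Int) - (op.length : Int) = -(((op.length - j : Nat) : Int)) := by
      omega
    rw [heq, PySem.List.clampIdx_neg_natCast _ _ (by omega)]
  rw [ha, hb] at hlen
  simp only [String.length_toList] at hlen
  omega

lemma pvMark_eq (s : String) (op? : Option String) (j : Nat) :
    pvA_mark s op? (j : Int) = if pvB_isOp s op? (j : Int) then 'o' else 'b' := by
  cases op? with
  | none => simp [pvA_mark, pvB_isOp]
  | some op =>
    by_cases hle : op.length ≤ j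
    · have hle' : ((op.length : Int) ≤ (j : Int)) := by exact_mod_cast hle
      simp only [pvA_mark, pvB_isOp, hle', decide_true, Bool.true_and]
      split_ifs with h1 h2 h2 <;> simp_all
    · have h0 : 0 < op.length := by omega
      have hne := pvSlice_ne s op j (by omega) h0
      have hle' : ¬ ((op.length : Int) ≤ (j : Int)) := by exact_mod_cast hle
      simp [pvA_mark, pvB_isOp, hne, hle']

lemma pvSet_at_len (acc r : List Int) (v x : Int) :
    (acc ++ x :: r).set acc.length v = (acc ++ [v]) ++ r := by
  induction acc with
  | nil => simp
  | cons a t iht => simp [iht]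

lemma pvLoop_rel (s d0 d1 : String) (op? : Option String) :
    ∀ (cl : List Char) (stackA : List Char) (acc : List Int) (opl brl : List Int),
      (∀ x ∈ stackA, x = 'o' ∨ x = 'b') →
      (if op?.isSome then opl else brl) = acc ++ List.replicate cl.length 0 →
      pvA_loop s d0 d1 op? (PySem.List.enumerate cl (acc.length : Int)) stackA opl brl
        = pvRef s d0 d1 op? (PySem.List.enumerate cl (acc.length : Int))
            (stackA.map (fun x => x == 'o')) (stackA.count 'o' : Int) (stackA.count 'b' : Int) acc := by
  intro cl
  induction cl with
  | nil =>
    intro stackA acc opl brl _ hsel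
    cases h : op?.isSome <;>
      simp_all [PySem.List.enumerate_nil, pvA_loop, pvRef]
  | cons c cl ih =>
    intro stackA acc opl brl hmem hsel
    rw [PySem.List.enumerate_cons]
    have hjt : ((acc.length : Int)).toNat = acc.length := Int.toNat_natCast _
    have hstep : ((acc.length : Int)) + 1 = (((acc.length + 1 : Nat)) : Int) := by push_cast; ring
    by_cases hd0 : String.mk [c] = d0
    · -- push branch
      simp only [pvA_loop, pvRef, if_pos hd0]
      have hmark : pvA_mark s op? ((acc.length : Int)) = if pvB_isOp s op? ((acc.length : Int)) then 'o' else 'b' :=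
        pvMark_eq s op? acc.length
      set isOp := pvB_isOp s op? ((acc.length : Int)) with hisOp
      have hco : (((pvA_mark s op? ((acc.length : Int))) :: stackA).count 'o' : Int)
          = (if isOp then (stackA.count 'o' : Int) + 1 else (stackA.count 'o' : Int)) := by
        rw [hmark]; cases isOp <;> simp
      have hcb : (((pvA_mark s op? ((acc.length : Int))) :: stackA).count 'b' : Int)
          = (if isOp then (stackA.count 'b' : Int) else (stackA.count 'b' : Int) + 1) := by
        rw [hmark]; cases isOp <;> simp
      have hmem' : ∀ x ∈ (pvA_mark s op? ((acc.length : Int))) :: stackA, x = 'o' ∨ x = 'b' := by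
        intro x hx
        rcases List.mem_cons.mp hx with h | h
        · rw [hmark] at h; cases isOp <;> simp_all
        · exact hmem x h
      have hmap : ((pvA_mark s op? ((acc.length : Int))) :: stackA).map (fun x => x == 'o')
          = isOp :: stackA.map (fun x => x == 'o') := by
        rw [hmark]; cases isOp <;> simp
      set v : Int := if op?.isSome then (if isOp then (stackA.count 'o' : Int) + 1 else (stackA.count 'o' : Int))
                     else (if isOp then (stackA.count 'b' : Int) else (stackA.count 'b' : Int) + 1) with hv
      have hsel' : (if op?.isSome
            then (if op?.isSome then opl.set ((acc.length : Int)).toNat ((((pvA_mark s op? ((acc.length : Int))) :: stackA).count 'o' : Int)) else opl)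
            else brl.set ((acc.length : Int)).toNat ((((pvA_mark s op? ((acc.length : Int))) :: stackA).count 'b' : Int)))
          = (acc ++ [v]) ++ List.replicate cl.length 0 := by
        cases hS : op?.isSome
        · simp only [Bool.false_eq_true, if_false]
          rw [hjt]
          rw [hS] at hsel; simp only [Bool.false_eq_true, if_false] at hsel
          rw [hsel]
          simp only [List.length_cons, List.replicate_succ]
          rw [pvSet_at_len, hcb, hv, hS]
          simp
        · simp only [if_true]
          rw [hjt]
          rw [hS] at hsel; simp only [if_true] at hsel
          rw [hsel]
          simp only [List.length_cons, List.replicate_succ]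
          rw [pvSet_at_len, hco, hv, hS]
          simp
      have hrec := ih ((pvA_mark s op? ((acc.length : Int))) :: stackA) (acc ++ [v]) _ _ hmem' hsel'
      rw [List.length_append, List.length_cons, List.length_nil] at hrec
      rw [hstep, hrec]
      cases hS : op?.isSome <;> simp [hS, hv, hco, hcb, hmap]
    · by_cases hd1 : String.mk [c] = d1
      · -- pop branch
        simp only [pvA_loop, pvRef, if_neg hd0, if_pos hd1]
        cases stackA with
        | nil => simp
        | cons top tl =>
          have htop : top = 'o' ∨ top = 'b' := hmem top (List.mem_cons_self)
          have hmem' : ∀ x ∈ tl, x = 'o' ∨ x = 'b' := fun x hx => hmem x (List.mem_cons_of_mem _ hx)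
          have hco : (tl.count 'o' : Int)
              = (if (top == 'o') then ((top :: tl).count 'o' : Int) - 1 else ((top :: tl).count 'o' : Int)) := by
            rcases htop with h | h <;> subst h <;> simp
          have hcb : (tl.count 'b' : Int)
              = (if (top == 'o') then ((top :: tl).count 'b' : Int) else ((top :: tl).count 'b' : Int) - 1) := by
            rcases htop with h | h <;> subst h <;> simp
          set v : Int := if op?.isSome then (tl.count 'o' : Int) else (tl.count 'b' : Int) with hv
          have hsel' : (if op?.isSome
                then (if op?.isSome then opl.set ((acc.length : Int)).toNat ((tl.count 'o' : Int)) else opl)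
                else brl.set ((acc.length : Int)).toNat ((tl.count 'b' : Int)))
              = (acc ++ [v]) ++ List.replicate cl.length 0 := by
            cases hS : op?.isSome
            · simp only [Bool.false_eq_true, if_false]
              rw [hjt]
              rw [hS] at hsel; simp only [Bool.false_eq_true, if_false] at hsel
              rw [hsel]
              simp only [List.length_cons, List.replicate_succ]
              rw [pvSet_at_len, hv, hS]
              simp
            · simp only [if_true]
              rw [hjt]
              rw [hS] at hsel; simp only [if_true] at hsel
              rw [hsel]
              simp only [List.length_cons, List.replicate_succ]
              rw [pvSet_at_len, hv, hS]
              simp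
          have hrec := ih tl (acc ++ [v]) _ _ hmem' hsel'
          rw [List.length_append, List.length_cons, List.length_nil] at hrec
          simp only [List.map_cons]
          rw [hstep, hrec]
          cases hS : op?.isSome <;> simp [hS, hv, hco, hcb]
      · -- plain character
        simp only [pvA_loop, pvRef, if_neg hd0, if_neg hd1]
        set v : Int := if op?.isSome then (stackA.count 'o' : Int) else (stackA.count 'b' : Int) with hv
        have hsel' : (if op?.isSome
              then (if op?.isSome then opl.set ((acc.length : Int)).toNat ((stackA.count 'o' : Int)) else opl)
              else brl.set ((acc.length : Int)).toNat ((stackA.count 'b' : Int)))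
            = (acc ++ [v]) ++ List.replicate cl.length 0 := by
          cases hS : op?.isSome
          · simp only [Bool.false_eq_true, if_false]
            rw [hjt]
            rw [hS] at hsel; simp only [Bool.false_eq_true, if_false] at hsel
            rw [hsel]
            simp only [List.length_cons, List.replicate_succ]
            rw [pvSet_at_len, hv, hS]
            simp
          · simp only [if_true]
            rw [hjt]
            rw [hS] at hsel; simp only [if_true] at hsel
            rw [hsel]
            simp only [List.length_cons, List.replicate_succ]
            rw [pvSet_at_len, hv, hS]
            simp
        have hrec := ih stackA (acc ++ [v]) _ _ hmem hsel'
        rw [List.length_append, List.length_cons, List.length_nil] at hrec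
        rw [hstep, hrec]

-- ---- difference-array bookkeeping ----

-- prefix sum of diff up to and including index k
def pvPref (l : List Int) (k : Nat) : Int := (l.take (k + 1)).sum

-- number of relevant opens whose position is ≤ k
def pvRelCnt (opens : List (Int × Bool)) (k : Nat) : Int :=
  ((opens.filter (fun pr => pr.2 && decide (pr.1 ≤ (k : Int)))).length : Int)

lemma pvPref_set (l : List Int) (i k : Nat) (v : Int) (h : i < l.length) :
    pvPref (l.set i (l.getD i 0 + v)) k = pvPref l k + if i ≤ k then v else 0 := by
  induction l generalizing i k with
  | nil => simp at h
  | cons a t iht =>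
    cases i with
    | zero =>
      simp only [pvPref, List.set_cons_zero, List.getD_cons_zero, List.take_succ_cons,
        List.sum_cons]
      rw [if_pos (Nat.zero_le k)]
      ring
    | succ i =>
      cases k with
      | zero => simp [pvPref]
      | succ k =>
        have := iht i k (by simpa using h)
        simp only [pvPref, List.take_succ_cons, List.sum_cons, List.getD_cons_succ,
          List.set_cons_succ] at *
        rw [this]
        simp only [Nat.add_le_add_iff_right]
        ring

lemma pvSum_set (l : List Int) (i : Nat) (v : Int) (h : i < l.length) :
    (l.set i (l.getD i 0 + v)).sum = l.sum + v := by
  have hk := pvPref_set l i l.length v h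
  have h1 : pvPref (l.set i (l.getD i 0 + v)) l.length = (l.set i (l.getD i 0 + v)).sum := by
    unfold pvPref
    rw [List.take_of_length_le (by simp)]
  have h2 : pvPref l l.length = l.sum := by
    unfold pvPref
    rw [List.take_of_length_le (by omega)]
  rw [h1, h2] at hk
  rw [hk, if_pos (by omega)]

lemma pvGetD_set_ne (l : List Int) (i m : Nat) (x : Int) (h : m ≠ i) :
    (l.set i x).getD m 0 = l.getD m 0 := by
  simp [List.getD, List.getElem?_set_ne (Ne.symm h)]

-- if every entry beyond index k is 0, the prefix sum at k is the whole sum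
lemma pvPref_eq_sum (l : List Int) (k : Nat) (hz : ∀ i, k + 1 ≤ i → l.getD i 0 = 0) :
    pvPref l k = l.sum := by
  unfold pvPref
  rw [← List.take_append_drop (k + 1) l, List.sum_append]
  have : (l.drop (k + 1)).sum = 0 := by
    apply List.sum_eq_zero
    intro x hx
    rw [List.mem_iff_getElem] at hx
    obtain ⟨m, hm, hx⟩ := hx
    have := hz (k + 1 + m) (by omega)
    rw [List.getD, List.getElem?_eq_getElem (by rw [List.length_drop] at hm; omega)] at this
    simp only [Option.getD_some] at this
    rw [← hx, List.getElem_drop]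
    exact this
  rw [List.take_append_drop] at *
  simp [this]

lemma pvPref_leftover (opens : List (Int × Bool)) (diff : List Int) (k : Nat)
    (hpos : ∀ pr ∈ opens, 0 ≤ pr.1 ∧ pr.1.toNat < diff.length) :
    pvPref (pvB_leftover opens diff) k = pvPref diff k + pvRelCnt opens k := by
  unfold pvB_leftover
  rw [List.foldl_reverse]
  induction opens with
  | nil => simp [pvRelCnt]
  | cons pr tl iht =>
    have hpos' : ∀ q ∈ tl, 0 ≤ q.1 ∧ q.1.toNat < diff.length := fun q hq => hpos q (List.mem_cons_of_mem _ hq)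
    have hlen : (tl.foldr (fun pr d => if pr.2 then d.set pr.1.toNat (d.getD pr.1.toNat 0 + 1) else d) diff).length = diff.length := by
      clear iht hpos hpos'
      induction tl with
      | nil => rfl
      | cons q tq ihq =>
        simp only [List.foldr_cons]
        split
        · rw [List.length_set]; exact ihq
        · exact ihq
    simp only [List.foldr_cons]
    rcases hpos pr List.mem_cons_self with ⟨hp0, hplt⟩
    by_cases hr : pr.2
    · rw [if_pos hr]
      rw [pvPref_set _ _ _ _ (by rw [hlen]; exact hplt), iht hpos']
      have hiff : pr.1.toNat ≤ k ↔ pr.1 ≤ (k : Int) := by omega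
      unfold pvRelCnt
      by_cases hle : pr.1 ≤ (k : Int)
      · rw [if_pos (hiff.mpr hle)]
        simp [hr, hle]
        push_cast
        ring
      · rw [if_neg (fun hc => hle (hiff.mp hc))]
        simp [hr, hle]
    · rw [if_neg hr, iht hpos']
      unfold pvRelCnt
      simp [hr]

lemma pvB_scan_eq (l : List Int) (a : Int) :
    pvB_scan l a = (List.range l.length).map (fun k => a + pvPref l k) := by
  induction l generalizing a with
  | nil => simp [pvB_scan]
  | cons d rest ih =>
    simp only [pvB_scan, List.length_cons, List.range_succ_eq_map, List.map_cons, List.map_map]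
    congr 1
    · simp [pvPref]
    · rw [ih]
      apply List.map_congr_left
      intro k _
      simp [pvPref, List.take_succ_cons]
      ring

-- small getD/append/count helpers
lemma pvGetD_append_lt (acc : List Int) (v : Int) (k : Nat) (h : k < acc.length) :
    (acc ++ [v]).getD k 0 = acc.getD k 0 := by
  simp [List.getD, List.getElem?_append_left h]

lemma pvGetD_append_self (acc : List Int) (v : Int) :
    (acc ++ [v]).getD acc.length 0 = v := by
  simp [List.getD]

lemma pvRelCnt_cons (p : Int) (rel : Bool) (tl : List (Int × Bool)) (k : Nat) :
    pvRelCnt ((p, rel) :: tl) k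
      = pvRelCnt tl k + if rel ∧ p ≤ (k : Int) then 1 else 0 := by
  unfold pvRelCnt
  rw [List.filter_cons]
  by_cases hr : rel
  · by_cases hle : p ≤ (k : Int) <;> simp [hr, hle]
  · simp [hr]

lemma pvRelCnt_all (opens : List (Int × Bool)) (k : Nat)
    (h : ∀ pr ∈ opens, pr.1 ≤ (k : Int)) :
    pvRelCnt opens k = (opens.countP (fun pr => pr.2) : Int) := by
  unfold pvRelCnt
  rw [List.countP_eq_length_filter]
  congr 2
  apply List.filter_congr
  intro pr hpr
  simp [h pr hpr]

lemma pvCountP_cons_int (q : Int × Bool) (l : List (Int × Bool)) :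
    (((q :: l).countP (fun pr => pr.2)) : Int)
      = ((l.countP (fun pr => pr.2)) : Int) + (if q.2 then 1 else 0) := by
  rw [List.countP_cons]
  cases h : q.2 <;> simp [h]

-- B's tail computation starting from an arbitrary mid-scan state
def pvBfin (s d0 d1 : String) (op? : Option String) (n : Nat)
    (rest : List (Int × Char)) (opens : List (Int × Bool)) (diff : List Int) : List Int :=
  match pvB_pass1 s d0 d1 op? rest opens diff with
  | none => []
  | some (d, o) => pvB_scan ((pvB_leftover o d).take n) 0

lemma pvLeftover_len (opens : List (Int × Bool)) (diff : List Int) :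
    (pvB_leftover opens diff).length = diff.length := by
  unfold pvB_leftover
  rw [List.foldl_reverse]
  induction opens with
  | nil => rfl
  | cons q tq ihq =>
    simp only [List.foldr_cons]
    split
    · rw [List.length_set]; exact ihq
    · exact ihq

-- main bridge: the counter reference loop computes B's final prefix-sum output
set_option maxHeartbeats 1600000 in
lemma pvRef_Bfin (s d0 d1 : String) (op? : Option String) (n : Nat) :
    ∀ (cl : List Char) (j : Nat) (opens : List (Int × Bool)) (diff : List Int)
      (stack : List Bool) (oc bc : Int) (acc : List Int),
      j + cl.length = n →
      diff.length = n + 1 →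
      acc.length = j →
      (∀ op, op? = some op → opens.map Prod.snd = stack) →
      (op? = none → opens.map Prod.snd = List.replicate stack.length true) →
      (op? = none → ∀ b ∈ stack, b = false) →
      ((if op?.isSome then oc else bc) = (opens.countP (fun pr => pr.2) : Int)) →
      (∀ pr ∈ opens, 0 ≤ pr.1 ∧ pr.1 < (j : Int)) →
      (∀ i, j ≤ i → diff.getD i 0 = 0) →
      diff.sum = 0 →
      (∀ k, k < j → acc.getD k 0 = pvPref diff k + pvRelCnt opens k) →
      pvRef s d0 d1 op? (PySem.List.enumerate cl (j : Int)) stack oc bc acc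
        = pvBfin s d0 d1 op? n (PySem.List.enumerate cl (j : Int)) opens diff := by
  intro cl
  induction cl with
  | nil =>
    intro j opens diff stack oc bc acc hn hdl hal hstkS hstkN hfalse hcnt hpos hhi hsum hacc
    simp only [List.length_nil, Nat.add_zero] at hn
    subst hn
    rw [PySem.List.enumerate_nil]
    simp only [pvRef, pvBfin, pvB_pass1]
    have hlo : (pvB_leftover opens diff).length = j + 1 := by rw [pvLeftover_len, hdl]
    have hpos' : ∀ pr ∈ opens, 0 ≤ pr.1 ∧ pr.1.toNat < diff.length := by
      intro pr hpr
      rcases hpos pr hpr with ⟨h0, h1⟩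
      exact ⟨h0, by omega⟩
    rw [pvB_scan_eq]
    apply List.ext_getElem
    · simp [hlo, hal]
    · intro k hk1 hk2
      simp only [List.length_map, List.length_range, List.length_take, hlo] at hk2
      have hkj : k < j := by omega
      have h1 : ((List.range ((pvB_leftover opens diff).take j).length).map
          (fun k => 0 + pvPref ((pvB_leftover opens diff).take j) k))[k]
          = 0 + pvPref ((pvB_leftover opens diff).take j) k := by
        rw [List.getElem_map, List.getElem_range]
      rw [h1]
      have htt : pvPref ((pvB_leftover opens diff).take j) k = pvPref (pvB_leftover opens diff) k := by
        unfold pvPref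
        rw [List.take_take, min_eq_left (by omega)]
      rw [htt, pvPref_leftover _ _ _ hpos']
      have := hacc k hkj
      rw [List.getD, List.getElem?_eq_getElem (by omega)] at this
      simp only [Option.getD_some] at this
      rw [← this]
      ring
  | cons c cl ih =>
    intro j opens diff stack oc bc acc hn hdl hal hstkS hstkN hfalse hcnt hpos hhi hsum hacc
    rw [PySem.List.enumerate_cons]
    have hjlt : j < n := by simp at hn; omega
    have hstep : ((j : Int)) + 1 = (((j + 1 : Nat)) : Int) := by push_cast; ring
    have hjt : ((j : Int)).toNat = j := Int.toNat_natCast _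
    have hPd : pvPref diff j = 0 := by
      rw [pvPref_eq_sum diff j (fun i hi => hhi i (by omega)), hsum]
    have hposall : ∀ pr ∈ opens, pr.1 ≤ ((j : Nat) : Int) := by
      intro pr hpr
      exact le_of_lt (hpos pr hpr).2
    by_cases hd0 : String.mk [c] = d0
    · -- push branch
      obtain ⟨relB, hrelB⟩ : ∃ b : Bool, (if op?.isSome then pvB_isOp s op? ((j : Int)) else true) = b :=
        ⟨_, rfl⟩
      have hisOp : pvB_isOp s op? ((j : Int)) = (if op?.isSome then relB else false) := by
        cases hOp : op?
        · rw [hOp] at hrelB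
          simp [pvB_isOp]
        · rw [hOp] at hrelB
          simp only [Option.isSome_some, if_true] at hrelB ⊢
          exact hrelB
      have hB : pvBfin s d0 d1 op? n (((j : Int), c) :: PySem.List.enumerate cl ((j : Int) + 1)) opens diff
          = pvBfin s d0 d1 op? n (PySem.List.enumerate cl ((j : Int) + 1)) (((j : Int), relB) :: opens) diff := by
        cases hOp : op?
        · rw [hOp] at hrelB
          simp only [Option.isSome_none, Bool.false_eq_true, if_false] at hrelB
          unfold pvBfin
          simp only [pvB_pass1, if_pos hd0, hrelB]
        · rw [hOp] at hrelB
          simp only [Option.isSome_some, if_true] at hrelB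
          unfold pvBfin
          simp only [pvB_pass1, if_pos hd0, hrelB]
      rw [hB]
      simp only [pvRef, if_pos hd0]
      rw [hstep]
      have hvcnt : (if op?.isSome then (if pvB_isOp s op? ((j : Int)) then oc + 1 else oc)
            else (if pvB_isOp s op? ((j : Int)) then bc else bc + 1))
          = (((((j : Int)), relB) :: opens).countP (fun pr => pr.2) : Int) := by
        rw [pvCountP_cons_int, ← hcnt, hisOp]
        cases hS : op?.isSome
        · simp only [Bool.false_eq_true, if_false]
          have : relB = true := by
            rw [hS] at hrelB
            simpa using hrelB.symm
          simp [this]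
        · simp only [if_true]
          cases hr : relB <;> simp [hr]
      apply ih (j + 1) (((j : Int), relB) :: opens) diff
        ((pvB_isOp s op? ((j : Int))) :: stack)
        (if pvB_isOp s op? ((j : Int)) then oc + 1 else oc)
        (if pvB_isOp s op? ((j : Int)) then bc else bc + 1)
        (acc ++ [if op?.isSome then (if pvB_isOp s op? ((j : Int)) then oc + 1 else oc)
          else (if pvB_isOp s op? ((j : Int)) then bc else bc + 1)])
      · simp only [List.length_cons] at hn; omega
      · exact hdl
      · simp [hal]
      · intro op hop
        rw [List.map_cons, hstkS op hop, hisOp, hop]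
        rfl
      · intro hno
        rw [List.map_cons, List.length_cons, List.replicate_succ, hstkN hno]
        have h1 : relB = true := by
          rw [hno] at hrelB
          simpa using hrelB.symm
        have h2 : pvB_isOp s op? ((j : Int)) = false := by
          rw [hisOp, hno]
          rfl
        simp [h1]
      · intro hno b hb
        rcases List.mem_cons.mp hb with h | h
        · rw [hno] at h
          simpa [pvB_isOp] using h
        · exact hfalse hno b h
      · exact hvcnt
      · intro pr hpr
        rcases List.mem_cons.mp hpr with h | h
        · subst h
          exact ⟨Int.natCast_nonneg j, by push_cast; omega⟩
        · rcases hpos pr h with ⟨h0, h1⟩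
          refine ⟨h0, by push_cast; omega⟩
      · intro i hi
        exact hhi i (by omega)
      · exact hsum
      · intro k hk
        by_cases hkj : k < j
        · rw [pvGetD_append_lt _ _ _ (by omega), hacc k hkj, pvRelCnt_cons]
          rw [if_neg (by rintro ⟨-, hle⟩; omega)]
          ring
        · have hkj' : k = j := by omega
          have hg : (acc ++ [if op?.isSome then (if pvB_isOp s op? ((j : Int)) then oc + 1 else oc)
              else (if pvB_isOp s op? ((j : Int)) then bc else bc + 1)]).getD k 0
              = (if op?.isSome then (if pvB_isOp s op? ((j : Int)) then oc + 1 else oc)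
              else (if pvB_isOp s op? ((j : Int)) then bc else bc + 1)) := by
            rw [show k = acc.length from by omega]
            exact pvGetD_append_self acc _
          rw [hg, hkj', hPd, hvcnt]
          rw [pvRelCnt_all _ _ (by
            intro pr hpr
            rcases List.mem_cons.mp hpr with h | h
            · subst h; simp
            · exact hposall pr h)]
          ring
    · by_cases hd1 : String.mk [c] = d1
      · -- pop branch
        have hlen : opens.length = stack.length := by
          cases hOp : op?
          · have := congrArg List.length (hstkN hOp)
            simpa using this
          · have := congrArg List.length (hstkS _ hOp)
            simpa using this
        cases hop : opens with
        | nil =>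
          have hst : stack = [] := by
            rw [hop] at hlen
            exact List.eq_nil_of_length_eq_zero hlen.symm
          subst hst
          simp only [pvRef, pvBfin, pvB_pass1, if_neg hd0, if_pos hd1]
        | cons pr tl =>
          obtain ⟨p, rel⟩ := pr
          cases hstk : stack with
          | nil => rw [hop, hstk] at hlen; simp at hlen
          | cons top tlS =>
            subst hop hstk
            have hrel1 : rel = (if op?.isSome then top else true) := by
              cases hOp : op?
              · have := hstkN hOp
                simp only [List.map_cons, List.length_cons, List.replicate_succ,
                  List.cons.injEq] at this
                simp [this.1]
              · have := hstkS _ hOp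
                simp only [List.map_cons, List.cons.injEq] at this
                simp [this.1]
            have hmapS : ∀ op, op? = some op → tl.map Prod.snd = tlS := by
              intro op hop2
              have := hstkS _ hop2
              simp only [List.map_cons, List.cons.injEq] at this
              exact this.2
            have hmapN : op? = none → tl.map Prod.snd = List.replicate tlS.length true := by
              intro hno
              have := hstkN hno
              simp only [List.map_cons, List.length_cons, List.replicate_succ,
                List.cons.injEq] at this
              exact this.2
            have htopfalse : op? = none → top = false := fun hno =>
              hfalse hno top List.mem_cons_self
            rcases hpos (p, rel) List.mem_cons_self with ⟨hp0, hplt⟩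
            have hpn : p.toNat < j := by omega
            have hpd : p.toNat < diff.length := by omega
            have hjd : j < diff.length := by omega
            obtain ⟨diffN, hdiffN⟩ : ∃ d : List Int,
                (if rel then
                  ((diff.set p.toNat (diff.getD p.toNat 0 + 1)).set ((j : Int)).toNat
                    ((diff.set p.toNat (diff.getD p.toNat 0 + 1)).getD ((j : Int)).toNat 0 - 1))
                else diff) = d := ⟨_, rfl⟩
            have hNlen : diffN.length = diff.length := by
              rw [← hdiffN]
              split <;> simp
            have hprefN : ∀ k, k < j → pvPref diffN k
                = pvPref diff k + (if (rel = true ∧ p.toNat ≤ k) then 1 else 0) := by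
              intro k hk
              rw [← hdiffN]
              cases hr : rel
              · simp only [Bool.false_eq_true, if_false, false_and, add_zero]
              · simp only [if_true, true_and]
                rw [show ((diff.set p.toNat (diff.getD p.toNat 0 + 1)).getD ((j : Int)).toNat 0 - 1)
                    = ((diff.set p.toNat (diff.getD p.toNat 0 + 1)).getD ((j : Int)).toNat 0 + (-1)) from by ring]
                rw [pvPref_set _ _ _ _ (by rw [List.length_set]; omega)]
                rw [pvPref_set _ _ _ _ hpd]
                rw [hjt, if_neg (show ¬ j ≤ k by omega)]
                ring
            have hhiN : ∀ i, j + 1 ≤ i → diffN.getD i 0 = 0 := by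
              intro i hi
              rw [← hdiffN]
              cases hr : rel
              · simp only [Bool.false_eq_true, if_false]
                exact hhi i (by omega)
              · simp only [if_true]
                rw [pvGetD_set_ne _ _ _ _ (by omega), pvGetD_set_ne _ _ _ _ (by omega)]
                exact hhi i (by omega)
            have hsumN : diffN.sum = 0 := by
              rw [← hdiffN]
              cases hr : rel
              · simpa using hsum
              · simp only [if_true]
                rw [show ((diff.set p.toNat (diff.getD p.toNat 0 + 1)).getD ((j : Int)).toNat 0 - 1)
                    = ((diff.set p.toNat (diff.getD p.toNat 0 + 1)).getD ((j : Int)).toNat 0 + (-1)) from by ring]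
                rw [pvSum_set _ _ _ (by rw [List.length_set]; omega)]
                rw [pvSum_set _ _ _ hpd, hsum]
                ring
            have hPdN : pvPref diffN j = 0 := by
              rw [pvPref_eq_sum diffN j hhiN, hsumN]
            have hvcnt : (if op?.isSome then (if top then oc - 1 else oc) else (if top then bc else bc - 1))
                = (tl.countP (fun pr => pr.2) : Int) := by
              have hcc := pvCountP_cons_int (p, rel) tl
              rw [hcc] at hcnt
              cases hS : op?.isSome
              · have hno : op? = none := by
                  cases hOp : op? <;> rw [hOp] at hS <;> simp_all
                have htop := htopfalse hno
                have hr : rel = true := by rw [hrel1, hS]; rfl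
                rw [hS] at hcnt
                simp only [Bool.false_eq_true, if_false] at hcnt ⊢
                rw [htop]
                simp only [Bool.false_eq_true, if_false]
                rw [hr] at hcnt
                simp only [if_true] at hcnt
                omega
              · have hr : rel = top := by rw [hrel1, hS]; rfl
                rw [hS] at hcnt
                simp only [if_true] at hcnt ⊢
                rw [hr] at hcnt
                cases ht : top <;> rw [ht] at hcnt <;>
                  simp only [if_true, Bool.false_eq_true, if_false] at hcnt ⊢ <;> omega
            have hB : pvBfin s d0 d1 op? n (((j : Int), c) :: PySem.List.enumerate cl ((j : Int) + 1)) ((p, rel) :: tl) diff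
                = pvBfin s d0 d1 op? n (PySem.List.enumerate cl ((j : Int) + 1)) tl diffN := by
              rw [← hdiffN]
              unfold pvBfin
              simp only [pvB_pass1, if_neg hd0, if_pos hd1]
            rw [hB]
            simp only [pvRef, if_neg hd0, if_pos hd1]
            rw [hstep]
            apply ih (j + 1) tl diffN tlS (if top then oc - 1 else oc) (if top then bc else bc - 1)
              (acc ++ [if op?.isSome then (if top then oc - 1 else oc) else (if top then bc else bc - 1)])
            · simp only [List.length_cons] at hn; omega
            · rw [hNlen, hdl]
            · simp [hal]
            · exact hmapS
            · exact hmapN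
            · intro hno b hb
              exact hfalse hno b (List.mem_cons_of_mem _ hb)
            · exact hvcnt
            · intro pr hpr
              rcases hpos pr (List.mem_cons_of_mem _ hpr) with ⟨h0, h1⟩
              refine ⟨h0, by push_cast; omega⟩
            · intro i hi
              exact hhiN i hi
            · exact hsumN
            · intro k hk
              by_cases hkj : k < j
              · rw [pvGetD_append_lt _ _ _ (by omega), hacc k hkj, pvRelCnt_cons]
                rw [hprefN k hkj]
                by_cases hr : rel = true
                · by_cases hple : p ≤ (k : Int)
                  · rw [if_pos ⟨hr, hple⟩, if_pos ⟨hr, by omega⟩]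
                    ring
                  · rw [if_neg (by rintro ⟨-, h⟩; exact hple h),
                      if_neg (by rintro ⟨-, h⟩; exact hple (by omega))]
                    ring
                · rw [if_neg (by rintro ⟨h, -⟩; exact hr h),
                    if_neg (by rintro ⟨h, -⟩; exact hr h)]
                  ring
              · have hkj' : k = j := by omega
                have hg : (acc ++ [if op?.isSome then (if top then oc - 1 else oc)
                    else (if top then bc else bc - 1)]).getD k 0
                    = (if op?.isSome then (if top then oc - 1 else oc)
                    else (if top then bc else bc - 1)) := by
                  rw [show k = acc.length from by omega]
                  exact pvGetD_append_self acc _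
                rw [hg, hkj', hPdN, hvcnt]
                rw [pvRelCnt_all _ _ (fun pr hpr => hposall pr (List.mem_cons_of_mem _ hpr))]
                ring
      · -- plain character
        have hB : pvBfin s d0 d1 op? n (((j : Int), c) :: PySem.List.enumerate cl ((j : Int) + 1)) opens diff
            = pvBfin s d0 d1 op? n (PySem.List.enumerate cl ((j : Int) + 1)) opens diff := by
          unfold pvBfin
          simp only [pvB_pass1, if_neg hd0, if_neg hd1]
        rw [hB]
        simp only [pvRef, if_neg hd0, if_neg hd1]
        rw [hstep]
        apply ih (j + 1) opens diff stack oc bc (acc ++ [if op?.isSome then oc else bc])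
        · simp only [List.length_cons] at hn; omega
        · exact hdl
        · simp [hal]
        · exact hstkS
        · exact hstkN
        · exact hfalse
        · exact hcnt
        · intro pr hpr
          rcases hpos pr hpr with ⟨h0, h1⟩
          refine ⟨h0, by push_cast; omega⟩
        · intro i hi
          exact hhi i (by omega)
        · exact hsum
        · intro k hk
          by_cases hkj : k < j
          · rw [pvGetD_append_lt _ _ _ (by omega)]
            exact hacc k hkj
          · have hkj' : k = j := by omega
            have hg : (acc ++ [if op?.isSome then oc else bc]).getD k 0
                = (if op?.isSome then oc else bc) := by
              rw [show k = acc.length from by omega]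
              exact pvGetD_append_self acc _
            rw [hg, hkj', hPd, hcnt]
            rw [pvRelCnt_all _ _ hposall]
            ring

-- initial state of the bridge lemma
lemma pvRef_Bfin_start (s d0 d1 : String) (op? : Option String) (cl : List Char) :
    pvRef s d0 d1 op? (PySem.List.enumerate cl 0) [] 0 0 []
      = pvBfin s d0 d1 op? cl.length (PySem.List.enumerate cl 0) []
          (List.replicate (cl.length + 1) 0) := by
  have h0 : ((0 : Nat) : Int) = (0 : Int) := rfl
  have := pvRef_Bfin s d0 d1 op? cl.length cl 0 [] (List.replicate (cl.length + 1) 0) [] 0 0 []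
    (by simp) (by simp) rfl (by simp) (by simp) (by intro _ b hb; simp at hb)
    (by cases op? <;> simp) (by intro pr hpr; simp at hpr)
    (by
      intro i _
      rw [List.getD]
      rcases lt_or_ge i (cl.length + 1) with h | h
      · rw [List.getElem?_replicate_of_lt h]; rfl
      · rw [List.getElem?_eq_none (by simpa using h)]; rfl)
    (by simp) (by intro k hk; omega)
  simpa using this

-- ===== VERDICT (by name: the statement is the Claim_ definition above) =====
theorem get_delim_levels_spec : Claim_equal_get_delim_levels := by
  intro s delims operator _ _
  unfold Spec_get_delim_levels get_delim_levels get_delim_levels_alt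
  dsimp only
  have keyA := pvLoop_rel s ((PySem.List.pyGet? delims 0).getD "") ((PySem.List.pyGet? delims 1).getD "")
  have keyB := pvRef_Bfin_start s ((PySem.List.pyGet? delims 0).getD "") ((PySem.List.pyGet? delims 1).getD "")
  cases operator with
  | none =>
    dsimp only
    have h1 := keyA none s.toList [] ([] : List Int)
      (List.replicate s.toList.length 0) (List.replicate s.toList.length 0) (by simp) (by simp)
    have h2 := keyB none s.toList
    simp only [List.length_nil, Nat.cast_zero, List.map_nil, List.count_nil, Nat.cast_ofNat] at h1 h2
    exact (h1.trans h2).trans (by rfl)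
  | some op =>
    dsimp only
    by_cases hc : PySem.Chars.count s.toList op.toList = 0
    · simp [hc]
    · have hA : ¬ (PySem.Str.count s op < 1) := by simpa [Nat.lt_one_iff] using hc
      have hB : ¬ ((PySem.Str.count s op == 0) = true) := by simpa using hc
      rw [if_neg hA, if_neg hB]
      have h1 := keyA (some op) s.toList [] ([] : List Int)
        (List.replicate s.toList.length 0) (List.replicate s.toList.length 0) (by simp) (by simp)
      have h2 := keyB (some op) s.toList
      simp only [List.length_nil, Nat.cast_zero, List.map_nil, List.count_nil, Nat.cast_ofNat] at h1 h2
      exact (h1.trans h2).trans (by rfl)
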